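-- pv_equiv track=rewrite | github.com/brookscl/aoc-2020 | day20.py | search_for_matching_edges
-- ===== SOURCE A (Python) =====
-- def find_all_matching_rows(search_tile, search_border, tiles):
--     matches = []
--     for tile_number, tile in tiles.items():
--         if search_tile != tile_number:
--             for i, border in enumerate(tile):
--                 if search_border == border:
--                     matches.append((tile_number, i, border))
--
--     return matches
--
-- def search_for_matching_edges(tiles):
--     matches = {}
--     for tile_number, tile in tiles.items():
--         match_list = {}
--         for i, border in enumerate(tile):
--             forward_matches = find_all_matching_rows(tile_number, border, tiles)
--             backward_matches = find_all_matching_rows(tile_number, border[::-1], tiles)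
--             match_list[i] = (forward_matches, backward_matches)
--         matches[tile_number] = match_list
--
--     return matches
-- ===== SOURCE B (Python) =====
-- def search_for_matching_edges(tiles):
--     # One pass builds border -> list of (tile, i, border); each query is then a lookup + filter.
--     index = {}
--     for tile_number, tile in tiles.items():
--         for i, border in enumerate(tile):
--             index.setdefault(border, []).append((tile_number, i, border))
--     matches = {}
--     for tile_number, tile in tiles.items():
--         match_list = {}
--         for i, border in enumerate(tile):
--             forward = [m for m in index.get(border, ()) if m[0] != tile_number]
--             backward = [m for m in index.get(border[::-1], ()) if m[0] != tile_number]
--             match_list[i] = (forward, backward)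
--         matches[tile_number] = match_list
--     return matches
-- ===== Notes on version B (the rewrite author's own statement) =====
-- stated objective: faster
-- what changed: B builds a border->rows dictionary in one pass and answers each forward/backward query by a single lookup plus a filter on the tile id, instead of A's rescan of every tile for every border of every tile.
import Mathlib
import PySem

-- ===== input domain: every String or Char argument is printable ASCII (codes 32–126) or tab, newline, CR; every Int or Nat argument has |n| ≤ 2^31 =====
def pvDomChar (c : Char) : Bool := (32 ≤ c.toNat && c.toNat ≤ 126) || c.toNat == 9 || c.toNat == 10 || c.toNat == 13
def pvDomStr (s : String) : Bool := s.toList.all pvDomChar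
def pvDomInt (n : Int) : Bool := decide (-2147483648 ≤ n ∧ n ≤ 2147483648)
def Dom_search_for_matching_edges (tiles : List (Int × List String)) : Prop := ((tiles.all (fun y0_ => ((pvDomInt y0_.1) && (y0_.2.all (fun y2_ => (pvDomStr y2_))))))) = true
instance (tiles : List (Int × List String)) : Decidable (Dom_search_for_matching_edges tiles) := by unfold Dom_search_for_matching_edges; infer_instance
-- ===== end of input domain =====

-- B replaces A's per-border rescan of all tiles with one precomputed border → rows index
-- (objective: faster). The Python argument is a dict, modelled as an association list;
-- both ports read it through PySem.Dict.ofList (= the dict's items(), in insertion order).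

-- ===== PORT A =====
-- s[::-1]: exact by PySem.Str.slice?_none_none_neg_one (xs[::-1] = reverse).
def pyRevStr (s : String) : String := String.ofList s.toList.reverse

def find_all_matching_rows (search_tile : Int) (search_border : String)
    (tiles : List (Int × List String)) : List (Int × Int × String) :=
  tiles.foldl (fun ms e =>
    if search_tile ≠ e.1 then
      (PySem.List.enumerate e.2).foldl (fun m p =>
        if search_border = p.2 then m ++ [(e.1, p.1, p.2)] else m) ms
    else ms) []

-- the inner dict match_list gets the distinct fresh keys 0,1,2,… and the outer dict the
-- distinct keys of tiles.items() (Dict keys are Nodup), so dict insertion = append: exact.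
def search_for_matching_edges (tiles : List (Int × List String)) :
    List (Int × List (Int × (List (Int × Int × String)) × (List (Int × Int × String)))) :=
  let its := (PySem.Dict.ofList tiles).items
  its.foldl (fun ms e =>
    let match_list := (PySem.List.enumerate e.2).foldl (fun ml p =>
      ml ++ [(p.1, (find_all_matching_rows e.1 p.2 its,
                    find_all_matching_rows e.1 (pyRevStr p.2) its))]) []
    ms ++ [(e.1, match_list)]) []

-- ===== PORT B =====
def search_for_matching_edges_alt (tiles : List (Int × List String)) :
    List (Int × List (Int × (List (Int × Int × String)) × (List (Int × Int × String)))) :=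
  let its := (PySem.Dict.ofList tiles).items
  let index : PySem.Dict String (List (Int × Int × String)) :=
    its.foldl (fun d e =>
      (PySem.List.enumerate e.2).foldl (fun d p =>
        d.modify p.2 [] (· ++ [(e.1, p.1, p.2)])) d) PySem.Dict.empty
  its.map (fun e =>
    (e.1, (PySem.List.enumerate e.2).map (fun p =>
      (p.1, ((index.getD p.2 []).filter (fun m => m.1 != e.1),
             (index.getD (String.ofList p.2.toList.reverse) []).filter (fun m => m.1 != e.1))))))

-- ===== PRECONDITION & SPEC =====
def Spec_search_for_matching_edges (tiles : List (Int × List String)) (out : List (Int × List (Int × (List (Int × Int × String)) × (List (Int × Int × String))))) : Prop := out = search_for_matching_edges_alt tiles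
instance (tiles : List (Int × List String)) (out : List (Int × List (Int × (List (Int × Int × String)) × (List (Int × Int × String))))) : Decidable (Spec_search_for_matching_edges tiles out) := by
  unfold Spec_search_for_matching_edges
  letI d3 : DecidableEq (Int × (List (Int × Int × String) × List (Int × Int × String))) := instDecidableEqProd
  letI d5 : DecidableEq (Int × List (Int × List (Int × Int × String) × List (Int × Int × String))) := instDecidableEqProd
  exact instDecidableEqList out _

-- ===== CLAIM (what is proved, stated in full; the proofs are below) =====
def Claim_equal_search_for_matching_edges : Prop := ∀ (tiles : List (Int × List String)), Dom_search_for_matching_edges tiles → Spec_search_for_matching_edges tiles (search_for_matching_edges tiles)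

-- ===== LEMMAS AND PROOFS =====

-- A's scan, characterised as a flatMap.
theorem find_all_eq_flatMap (t : Int) (b : String) (its : List (Int × List String)) :
    find_all_matching_rows t b its =
      its.flatMap (fun e =>
        if t ≠ e.1 then
          ((PySem.List.enumerate e.2).filter (fun p => p.2 == b)).map (fun p => (e.1, p.1, p.2))
        else []) := by
  unfold find_all_matching_rows
  rw [PySem.List.foldl_congr_mem _ _
      (fun ms e =>
        ms ++ (if t ≠ e.1 then
          ((PySem.List.enumerate e.2).filter (fun p => p.2 == b)).map (fun p => (e.1, p.1, p.2))
        else [])) _ ?hb]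
  case hb =>
    intro acc e _
    dsimp only
    split_ifs with h
    · rw [PySem.List.foldl_append_ite (fun p => b = p.2) (fun p => (e.1, p.1, p.2))
          (PySem.List.enumerate e.2) acc]
      congr 1
      apply congrArg
      apply List.filter_congr
      intro p _
      simp [beq_eq_decide, eq_comm]
    · exact (List.append_nil acc).symm
  rw [PySem.List.foldl_append_eq_flatMap]
  simp

-- B's index, looked up at b, lists all rows whose border equals b, in scan order.
theorem index_getD (its : List (Int × List String)) (b : String) :
    ((its.foldl (fun d e =>
        (PySem.List.enumerate e.2).foldl (fun d p =>
          d.modify p.2 [] (· ++ [(e.1, p.1, p.2)])) d)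
      (PySem.Dict.empty : PySem.Dict String (List (Int × Int × String)))).getD b []) =
      its.flatMap (fun e =>
        ((PySem.List.enumerate e.2).filter (fun p => p.2 == b)).map (fun p => (e.1, p.1, p.2))) := by
  have h1 := PySem.List.foldl_congr_mem its
      (fun d e =>
        (PySem.List.enumerate e.2).foldl (fun d p =>
          d.modify p.2 [] (· ++ [(e.1, p.1, p.2)])) d)
      (fun d e =>
        ((PySem.List.enumerate e.2).map (fun p => (p.2, (e.1, p.1, p.2)))).foldl
          (fun d q => d.modify q.1 [] (· ++ [q.2])) d)
      (PySem.Dict.empty : PySem.Dict String (List (Int × Int × String)))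
      (by intro d e _; dsimp only; rw [List.foldl_map])
  rw [h1, ← List.foldl_flatMap, PySem.Dict.getD_foldl_modify_append]
  simp [List.filter_flatMap, List.map_flatMap, List.filter_map, Function.comp_def]

-- filtering the indexed rows (whose first component is their tile) by m.1 != t
-- is exactly A's "skip the searching tile" test.
theorem filter_ne_flatMap (its : List (Int × List String)) (t : Int) (b : String) :
    (its.flatMap (fun e =>
        ((PySem.List.enumerate e.2).filter (fun p => p.2 == b)).map
          (fun p => (e.1, p.1, p.2)))).filter (fun m => m.1 != t) =
      its.flatMap (fun e =>
        if t ≠ e.1 then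
          ((PySem.List.enumerate e.2).filter (fun p => p.2 == b)).map (fun p => (e.1, p.1, p.2))
        else []) := by
  rw [List.filter_flatMap]
  apply List.flatMap_congr
  intro e _
  rw [List.filter_map]
  by_cases h : t = e.1
  · subst h
    simp [Function.comp_def]
  · rw [if_pos h]
    rw [List.filter_congr (q := fun _ => true) ?hp, List.filter_true]
    intro p _
    simp [bne_iff_ne, Ne.symm h]

-- one B lookup+filter = one A scan.
theorem key_lookup (its : List (Int × List String)) (t : Int) (b : String) :
    ((its.foldl (fun d e =>
        (PySem.List.enumerate e.2).foldl (fun d p =>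
          d.modify p.2 [] (· ++ [(e.1, p.1, p.2)])) d)
      (PySem.Dict.empty : PySem.Dict String (List (Int × Int × String)))).getD b []).filter
        (fun m => m.1 != t) =
      find_all_matching_rows t b its := by
  rw [index_getD, filter_ne_flatMap, find_all_eq_flatMap]

-- the whole computation, over an arbitrary items list.
theorem main_eq (its : List (Int × List String)) :
    its.foldl (fun ms e =>
      ms ++ [(e.1, (PySem.List.enumerate e.2).foldl (fun ml p =>
        ml ++ [(p.1, (find_all_matching_rows e.1 p.2 its,
                      find_all_matching_rows e.1 (pyRevStr p.2) its))]) [])]) [] =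
      its.map (fun e =>
        (e.1, (PySem.List.enumerate e.2).map (fun p =>
          (p.1, (((its.foldl (fun d e =>
              (PySem.List.enumerate e.2).foldl (fun d p =>
                d.modify p.2 [] (· ++ [(e.1, p.1, p.2)])) d)
            (PySem.Dict.empty : PySem.Dict String (List (Int × Int × String)))).getD p.2 []).filter
              (fun m => m.1 != e.1),
            ((its.foldl (fun d e =>
              (PySem.List.enumerate e.2).foldl (fun d p =>
                d.modify p.2 [] (· ++ [(e.1, p.1, p.2)])) d)
            (PySem.Dict.empty : PySem.Dict String (List (Int × Int × String)))).getD
              (String.ofList p.2.toList.reverse) []).filter (fun m => m.1 != e.1)))))) := by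
  rw [PySem.List.foldl_append_singleton_eq_map]
  apply List.map_congr_left
  intro e _
  apply congrArg
  rw [PySem.List.foldl_append_singleton_eq_map]
  apply List.map_congr_left
  intro p _
  rw [key_lookup its e.1 p.2, key_lookup its e.1 (String.ofList p.2.toList.reverse)]
  rfl

-- ===== VERDICT (by name: the statement is the Claim_ definition above) =====
theorem search_for_matching_edges_spec : Claim_equal_search_for_matching_edges := by
  intro tiles _
  exact main_eq ((PySem.Dict.ofList tiles).items)
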